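/- GENERATED by farm/worked/mk_tree_copies.py from farm/worked/imdct_step3_iter0_loop.1/Proof.lean (a worked proof of the farm's unit `imdct_step3_iter0_loop.1`,
   accepted by the verdict) — do not edit. -/
import Asan.CheckWalk
import Vorbis.Spec.Units.imdct_step3_iter0_loop_1
open X86 X86.User Asan Vorbis Vorbis.Spec

set_option maxRecDepth 4000
set_option maxHeartbeats 4000000

/-- Segment 1 of `imdct_step3_iter0_loop` (the function's entry … `loop1`: six pushes, `sar`, two `movsxd`, two `lea`): a segment
that STARTS at the function's entry (`he`, `hpre` as in a whole function) and ENDS at a cut point: the exit assertion `AtLoop` is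
BUILT from the walker's facts — the frame (`w_rsp`, the seven stack slots by `u_resolve`), the footprint so far (`u_same` against
the Spec's footprint), `ShadowUntouched` (`v_untouched`), and the ghost values of the registers as numbers (`arg32_sar`,
`arg32_sext`, `IsNeg32.sext`, `add_mul4`, `add_neg_mul4` of Vorbis/Spec/Common.lean). -/
theorem Vorbis.Spec.Worked.imdct_step3_iter0_loop_1_ok : Vorbis.Spec.imdct_step3_iter0_loop_1.Statement := by
  intro Lay hLay μ hμ u₀ hcode others frames len i0 koff ue ret he hpre
  have he0 := he
  have hpre0 := hpre
  v_entry he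
  obtain ⟨hsh, hn31, hi0, hneg, hpair, hlive, hA⟩ := hpre
  have hsp := hsh.rsp
  u_walk hcode [hμ.vendor] until [Vorbis.L.imdct_step3_iter0_loop.loop1] span [Vorbis.L.textLo, Vorbis.L.textHi] side (v_side)
  refine ReachVia.done ⟨w_rip, ?_⟩
  -- where the buffer is: inside the data space, no wrap-around
  have hwhere := hlive.where_ hsh.inv hsh.offText (by have := hpair.hi; omega) (by omega)
  have hhi := hpair.hi
  have hlo := hpair.lo
  -- the three 32-bit arguments as numbers
  have e14 := arg32_sar ue .rdi 2 hn31
  have hi31 : arg32 ue .rdx < 2 ^ 31 := by omega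
  have edx := arg32_sext ue .rdx hi31
  have ecx := hneg.sext
  obtain ⟨hk1, hk2, _⟩ := hneg
  refine ⟨⟨he0, hpre0, w_eq, ?abi, ⟨w_rsp, ?_, ?_, ?_, ?_, ?_, ?_, ?_⟩, ?same, ?shadow⟩, Nat.zero_le _, ?cnt, ?ee0, ?ee2, ?A⟩
  case abi => v_inv
  case same =>
    simp only [X86.User.Spec.footprint, vspec]
    u_same
  case shadow => v_untouched
  case cnt =>
    rw [w_r14, e14, quarter_def, arg32_def]
    omega
  case ee0 =>
    rw [w_r12, add_mul4 _ _ _ edx (by omega)]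
    omega
  case ee2 =>
    rw [w_rbx, add_neg_mul4 _ _ koff ecx hk1 (by rw [add_mul4 _ _ _ edx (by omega)]; omega), add_mul4 _ _ _ edx (by omega)]
    omega
  case A =>
    rw [w_rbp]
    omega
  all_goals u_resolve
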